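-- pv_equiv track=rewrite | github.com/yuxin101/skills | skills/huangrichao2020/uwillberich/scripts/industry_chain.py | build_symbol_index
-- ===== SOURCE A (Python) =====
-- def merge_item_details(existing: dict, incoming: dict) -> dict:
--     merged = dict(existing)
--     for key, value in incoming.items():
--         if not merged.get(key) and value:
--             merged[key] = value
--     return merged
--
-- def build_symbol_index(base_watchlists: dict) -> dict[str, dict]:
--     symbol_index: dict[str, dict] = {}
--     for items in base_watchlists.values():
--         for item in items:
--             symbol = item["symbol"]
--             if symbol in symbol_index:
--                 symbol_index[symbol] = merge_item_details(symbol_index[symbol], item)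
--             else:
--                 symbol_index[symbol] = dict(item)
--     return symbol_index
-- ===== SOURCE B (Python) =====
-- def build_symbol_index(base_watchlists: dict) -> dict[str, dict]:
--     # Pass 1: group the items by symbol, preserving first-appearance order of
--     # symbols and the original order of items within each group.
--     groups: dict[str, list] = {}
--     for items in base_watchlists.values():
--         for item in items:
--             groups.setdefault(item["symbol"], []).append(item)
--     # Pass 2: reduce each group to its merged details.
--     symbol_index: dict[str, dict] = {}
--     for symbol, group in groups.items():
--         merged = dict(group[0])
--         for item in group[1:]:
--             for key, value in item.items():
--                 if value and not merged.get(key):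
--                     merged[key] = value
--         symbol_index[symbol] = merged
--     return symbol_index
-- ===== Notes on version B (the rewrite author's own statement) =====
-- stated objective: alternative
-- what changed: Replaces A's single interleaved pass (merge each item into the index as it is encountered) with a group-then-reduce decomposition: one pass groups items by symbol into an intermediate ordered table, a second pass seeds each group's merged dict from its first item and folds the later items in.
import Mathlib
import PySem

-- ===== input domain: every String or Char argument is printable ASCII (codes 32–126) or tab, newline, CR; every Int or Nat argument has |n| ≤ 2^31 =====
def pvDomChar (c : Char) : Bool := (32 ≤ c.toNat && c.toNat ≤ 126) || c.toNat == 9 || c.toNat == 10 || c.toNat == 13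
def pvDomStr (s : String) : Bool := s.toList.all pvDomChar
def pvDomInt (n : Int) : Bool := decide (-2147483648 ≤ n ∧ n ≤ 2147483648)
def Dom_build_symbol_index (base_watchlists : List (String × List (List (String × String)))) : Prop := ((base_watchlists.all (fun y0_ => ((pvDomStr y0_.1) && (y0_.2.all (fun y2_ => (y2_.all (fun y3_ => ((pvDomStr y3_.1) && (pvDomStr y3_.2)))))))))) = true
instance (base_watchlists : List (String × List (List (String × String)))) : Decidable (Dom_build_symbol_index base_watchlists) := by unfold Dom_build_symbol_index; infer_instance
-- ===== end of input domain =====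

-- B replaces A's interleaved per-item merge with a group-by-symbol pass followed by a
-- per-group reduce (objective: alternative decomposition, same cost).

-- ===== PORT A =====
-- merge_item_details: copy `existing`, then add each (key, value) of `incoming`
-- whose value is truthy where the current value is falsy (missing or "").
def pv_mergeA (existing incoming : PySem.Dict String String) : PySem.Dict String String :=
  incoming.items.foldl
    (fun merged kv =>
      if (merged.getD kv.1 "") = "" ∧ kv.2 ≠ "" then merged.insert kv.1 kv.2 else merged)
    existing

-- one iteration of A's inner loop; `none` from item["symbol"] is Python's KeyError,
-- excluded by Pre_build_symbol_index.  `symbol in symbol_index` + the indexing are the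
-- `match` on get?.
def pv_stepA (idx : PySem.Dict String (PySem.Dict String String))
    (item : List (String × String)) : PySem.Dict String (PySem.Dict String String) :=
  match (PySem.Dict.ofList item).get? "symbol" with
  | none => idx
  | some s =>
    match idx.get? s with
    | some existing => idx.insert s (pv_mergeA existing (PySem.Dict.ofList item))
    | none => idx.insert s (PySem.Dict.ofList item)

def build_symbol_index (base_watchlists : List (String × List (List (String × String)))) : List (String × List (String × String)) :=
  let d := PySem.Dict.ofList base_watchlists
  let idx := d.values.foldl (fun idx items => items.foldl pv_stepA idx) PySem.Dict.empty
  idx.items.map (fun p => (p.1, p.2.items))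

-- ===== PORT B =====
-- one step of B's inner key/value loop
def pv_mergeStepB (m : PySem.Dict String String) (kv : String × String) : PySem.Dict String String :=
  if kv.2 ≠ "" ∧ (m.getD kv.1 "") = "" then m.insert kv.1 kv.2 else m

-- fold one later item of a group into the accumulated merged dict
def pv_foldItemB (m itemd : PySem.Dict String String) : PySem.Dict String String :=
  itemd.items.foldl pv_mergeStepB m

-- one step of B's grouping loop; `groups.setdefault(sym, []).append(item)` is the
-- modify-with-default-and-append (Python appends in place to the dict's own list).
def pv_stepG (g : PySem.Dict String (List (PySem.Dict String String)))
    (item : List (String × String)) : PySem.Dict String (List (PySem.Dict String String)) :=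
  match (PySem.Dict.ofList item).get? "symbol" with
  | none => g
  | some s => g.modify s [] (fun l => l ++ [PySem.Dict.ofList item])

-- one step of B's reduce loop; groups are never empty, the [] branch is unreachable
def pv_stepAsm (idx : PySem.Dict String (PySem.Dict String String))
    (p : String × List (PySem.Dict String String)) : PySem.Dict String (PySem.Dict String String) :=
  match p.2 with
  | [] => idx
  | first :: rest => idx.insert p.1 (rest.foldl pv_foldItemB first)

def build_symbol_index_alt (base_watchlists : List (String × List (List (String × String)))) : List (String × List (String × String)) :=
  let d := PySem.Dict.ofList base_watchlists
  let groups := d.values.foldl (fun g items => items.foldl pv_stepG g) PySem.Dict.empty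
  let idx := groups.items.foldl pv_stepAsm PySem.Dict.empty
  idx.items.map (fun p => (p.1, p.2.items))

-- ===== PRECONDITION & SPEC =====
-- Pre_ excludes exactly the inputs on which Python's item["symbol"] raises KeyError:
-- some item dict (of a watchlist that survives outer duplicate-key collapsing) has no
-- "symbol" key.
def Pre_build_symbol_index (base_watchlists : List (String × List (List (String × String)))) : Prop :=
  ((PySem.Dict.ofList base_watchlists).values.all
    (fun items => items.all (fun item => (PySem.Dict.ofList item).contains "symbol"))) = true
instance (base_watchlists : List (String × List (List (String × String)))) : Decidable (Pre_build_symbol_index base_watchlists) := by unfold Pre_build_symbol_index; infer_instance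

def pvWitness_build_symbol_index : (List (String × List (List (String × String)))) :=
  [("tech", [[("symbol", "AAPL"), ("name", "")], [("symbol", "AAPL"), ("name", "Apple")]]),
   ("fund", [[("symbol", "MSFT"), ("sector", "IT")]])]

def Spec_build_symbol_index (base_watchlists : List (String × List (List (String × String)))) (out : List (String × List (String × String))) : Prop := out = build_symbol_index_alt base_watchlists
instance (base_watchlists : List (String × List (List (String × String)))) (out : List (String × List (String × String))) : Decidable (Spec_build_symbol_index base_watchlists out) := by unfold Spec_build_symbol_index; infer_instance

-- ===== CLAIM (what is proved, stated in full; the proofs are below) =====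
def Claim_equal_build_symbol_index : Prop := ∀ (base_watchlists : List (String × List (List (String × String)))), Dom_build_symbol_index base_watchlists → Pre_build_symbol_index base_watchlists → Spec_build_symbol_index base_watchlists (build_symbol_index base_watchlists)

-- ===== LEMMAS AND PROOFS =====

theorem pv_dict_ext {κ ν : Type} {a b : PySem.Dict κ ν} (h : a.items = b.items) : a = b := by
  cases a; cases b; cases h; rfl

-- reduce of one group (proof-side characterisation of B's per-group loop)
def pv_mg (grp : List (PySem.Dict String String)) : PySem.Dict String String :=
  match grp with
  | [] => PySem.Dict.empty
  | first :: rest => rest.foldl pv_foldItemB first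

-- map pv_mg over the values of the grouping dict
def pv_vmap (G : PySem.Dict String (List (PySem.Dict String String))) :
    PySem.Dict String (PySem.Dict String String) :=
  PySem.Dict.mk (G.items.map (fun p => (p.1, pv_mg p.2)))

theorem pv_get?_vmap (G : PySem.Dict String (List (PySem.Dict String String))) (s : String) :
    (pv_vmap G).get? s = (G.get? s).map pv_mg := by
  simp only [pv_vmap, PySem.Dict.get?, List.find?_map]
  have hc : ((fun p : String × PySem.Dict String String => p.1 == s) ∘
      (fun p : String × List (PySem.Dict String String) => (p.1, pv_mg p.2)))
      = (fun p => p.1 == s) := rfl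
  rw [hc]
  cases G.items.find? (fun p => p.1 == s) <;> rfl

theorem pv_contains_vmap (G : PySem.Dict String (List (PySem.Dict String String))) (s : String) :
    (pv_vmap G).contains s = G.contains s := by
  rw [PySem.Dict.contains_eq_isSome_get?, PySem.Dict.contains_eq_isSome_get?, pv_get?_vmap]
  cases G.get? s <;> rfl

theorem pv_insert_vmap (G : PySem.Dict String (List (PySem.Dict String String)))
    (s : String) (v : List (PySem.Dict String String)) :
    (pv_vmap G).insert s (pv_mg v) = pv_vmap (G.insert s v) := by
  apply pv_dict_ext
  by_cases h : G.contains s = true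
  · have h' : (pv_vmap G).contains s = true := by rw [pv_contains_vmap]; exact h
    rw [PySem.Dict.items_insert_of_contains _ _ h']
    show _ = (PySem.Dict.insert G s v).items.map _
    rw [PySem.Dict.items_insert_of_contains _ _ h]
    simp only [pv_vmap, List.map_map]
    apply List.map_congr_left
    intro p _
    by_cases hp : (p.1 == s) = true <;> simp [Function.comp, hp]
  · have hf : G.contains s = false := by simpa using h
    have h' : (pv_vmap G).contains s = false := by rw [pv_contains_vmap]; exact hf
    rw [PySem.Dict.items_insert_of_not_contains _ _ h']
    show _ = (PySem.Dict.insert G s v).items.map _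
    rw [PySem.Dict.items_insert_of_not_contains _ _ hf]
    simp [pv_vmap]

-- A's merge helper computes the same dict as B's inline key/value fold
theorem pv_mergeA_eq_foldItemB (e i : PySem.Dict String String) :
    pv_mergeA e i = pv_foldItemB e i := by
  unfold pv_mergeA pv_foldItemB
  have hstep : (fun (merged : PySem.Dict String String) (kv : String × String) =>
      if (merged.getD kv.1 "") = "" ∧ kv.2 ≠ "" then merged.insert kv.1 kv.2 else merged)
      = pv_mergeStepB := by
    funext m kv
    unfold pv_mergeStepB
    by_cases h : (m.getD kv.1 "") = "" ∧ kv.2 ≠ ""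
    · rw [if_pos h, if_pos ⟨h.2, h.1⟩]
    · rw [if_neg h, if_neg (fun hc => h ⟨hc.2, hc.1⟩)]
  rw [hstep]

-- one item processed: A's step on the merged view mirrors B's grouping step
theorem pv_step (G : PySem.Dict String (List (PySem.Dict String String)))
    (hnd : G.keys.Nodup) (hne : ∀ p ∈ G.items, p.2 ≠ []) (x : List (String × String)) :
    pv_stepA (pv_vmap G) x = pv_vmap (pv_stepG G x)
    ∧ (pv_stepG G x).keys.Nodup ∧ ∀ p ∈ (pv_stepG G x).items, p.2 ≠ [] := by
  unfold pv_stepA pv_stepG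
  cases hs : (PySem.Dict.ofList x).get? "symbol" with
  | none => exact ⟨rfl, hnd, hne⟩
  | some s =>
    show (match (pv_vmap G).get? s with
          | some existing => (pv_vmap G).insert s (pv_mergeA existing (PySem.Dict.ofList x))
          | none => (pv_vmap G).insert s (PySem.Dict.ofList x))
          = pv_vmap (G.modify s [] fun l => l ++ [PySem.Dict.ofList x])
        ∧ (G.modify s [] fun l => l ++ [PySem.Dict.ofList x]).keys.Nodup
        ∧ ∀ p ∈ (G.modify s [] fun l => l ++ [PySem.Dict.ofList x]).items, p.2 ≠ []
    cases hg : G.get? s with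
    | none =>
      have hcf : G.contains s = false := by
        rw [PySem.Dict.contains_eq_isSome_get?, hg]; rfl
      have hmod : (G.modify s [] fun l => l ++ [PySem.Dict.ofList x])
          = G.insert s [PySem.Dict.ofList x] := by
        unfold PySem.Dict.modify
        rw [PySem.Dict.getD_eq_get?_getD, hg]
        rfl
      rw [hmod, pv_get?_vmap, hg, Option.map_none]
      refine ⟨?_, ?_, ?_⟩
      · show (pv_vmap G).insert s (pv_mg [PySem.Dict.ofList x]) = _
        exact pv_insert_vmap G s [PySem.Dict.ofList x]
      · rw [PySem.Dict.keys_insert_of_not_contains _ _ hcf]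
        have hsn : s ∉ G.keys := by
          rw [← PySem.Dict.contains_iff_mem_keys]
          simp [hcf]
        rw [List.nodup_append]
        refine ⟨hnd, List.nodup_singleton s, ?_⟩
        intro a ha b hb hab
        rw [List.mem_singleton] at hb
        exact hsn (hb ▸ hab ▸ ha)
      · rw [PySem.Dict.items_insert_of_not_contains _ _ hcf]
        intro p hp
        rcases List.mem_append.mp hp with hp | hp
        · exact hne p hp
        · simp only [List.mem_singleton] at hp
          subst hp; simp
    | some grp =>
      have hct : G.contains s = true := by
        rw [PySem.Dict.contains_eq_isSome_get?, hg]; rfl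
      have hmod : (G.modify s [] fun l => l ++ [PySem.Dict.ofList x])
          = G.insert s (grp ++ [PySem.Dict.ofList x]) := by
        unfold PySem.Dict.modify
        rw [PySem.Dict.getD_eq_get?_getD, hg]
        rfl
      have hgrpne : grp ≠ [] := hne (s, grp) (PySem.Dict.mem_items_of_get?_eq_some _ hg)
      have hmg : pv_mergeA (pv_mg grp) (PySem.Dict.ofList x)
          = pv_mg (grp ++ [PySem.Dict.ofList x]) := by
        cases grp with
        | nil => exact absurd rfl hgrpne
        | cons a r =>
          show pv_mergeA (pv_mg (a :: r)) _ = (r ++ [PySem.Dict.ofList x]).foldl pv_foldItemB a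
          rw [List.foldl_append, List.foldl_cons, List.foldl_nil]
          exact pv_mergeA_eq_foldItemB _ _
      rw [hmod, pv_get?_vmap, hg, Option.map_some]
      refine ⟨?_, ?_, ?_⟩
      · show (pv_vmap G).insert s (pv_mergeA (pv_mg grp) (PySem.Dict.ofList x)) = _
        rw [hmg]
        exact pv_insert_vmap G s (grp ++ [PySem.Dict.ofList x])
      · rw [PySem.Dict.keys_insert_of_contains _ _ hct]
        exact hnd
      · rw [PySem.Dict.items_insert_of_contains _ _ hct]
        intro p hp
        rcases List.mem_map.mp hp with ⟨q, hq, hpq⟩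
        by_cases hqs : (q.1 == s) = true
        · rw [if_pos hqs] at hpq
          subst hpq; simp
        · rw [if_neg hqs] at hpq
          subst hpq; exact hne q hq

-- main invariant: A's incremental index is the value-wise merge of B's grouping dict,
-- whose keys stay distinct and whose groups stay nonempty
theorem pv_inv (L : List (List (String × String))) :
    L.foldl pv_stepA PySem.Dict.empty = pv_vmap (L.foldl pv_stepG PySem.Dict.empty)
    ∧ (L.foldl pv_stepG PySem.Dict.empty).keys.Nodup
    ∧ ∀ p ∈ (L.foldl pv_stepG PySem.Dict.empty).items, p.2 ≠ [] := by
  induction L using List.reverseRecOn with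
  | nil => refine ⟨rfl, ?_, ?_⟩ <;> simp [PySem.Dict.empty, PySem.Dict.keys]
  | append_singleton L x ih =>
    obtain ⟨hI, hnd, hne⟩ := ih
    rw [List.foldl_append, List.foldl_append, List.foldl_cons, List.foldl_nil,
        List.foldl_cons, List.foldl_nil, hI]
    exact pv_step _ hnd hne x

-- B's assemble loop over an association list with distinct keys and nonempty groups
-- builds exactly the value-wise merged dict
theorem pv_assemble (ps : List (String × List (PySem.Dict String String)))
    (hnd : (ps.map Prod.fst).Nodup) (hne : ∀ p ∈ ps, p.2 ≠ []) :
    ps.foldl pv_stepAsm PySem.Dict.empty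
      = PySem.Dict.mk (ps.map (fun p => (p.1, pv_mg p.2))) := by
  induction ps using List.reverseRecOn with
  | nil => rfl
  | append_singleton ps p ih =>
    rw [List.map_append] at hnd
    have hnd' := hnd.of_append_left
    have hp1 : p.1 ∉ ps.map Prod.fst := by
      intro hmem
      have := List.disjoint_of_nodup_append hnd
      exact this hmem (by simp)
    rw [List.foldl_append, List.foldl_cons, List.foldl_nil,
        ih hnd' (fun q hq => hne q (List.mem_append_left _ hq))]
    have hpne : p.2 ≠ [] := hne p (by simp)
    have hcf : (PySem.Dict.mk (ps.map (fun p => (p.1, pv_mg p.2)))).contains p.1 = false := by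
      rw [PySem.Dict.contains_eq_decide_mem_keys, PySem.Dict.keys_mk, List.map_map]
      simp only [decide_eq_false_iff_not, List.mem_map, Function.comp]
      rintro ⟨q, hq, hq1⟩
      exact hp1 (List.mem_map.mpr ⟨q, hq, hq1⟩)
    cases hp2 : p.2 with
    | nil => exact absurd hp2 hpne
    | cons first rest =>
      have hstep : pv_stepAsm (PySem.Dict.mk (ps.map (fun p => (p.1, pv_mg p.2)))) p
          = (PySem.Dict.mk (ps.map (fun p => (p.1, pv_mg p.2)))).insert p.1 (pv_mg p.2) := by
        unfold pv_stepAsm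
        rw [hp2]
        rfl
      rw [hstep]
      apply pv_dict_ext
      rw [PySem.Dict.items_insert_of_not_contains _ _ hcf]
      simp

-- ===== VERDICT (by name: the statement is the Claim_ definition above) =====
theorem build_symbol_index_spec : Claim_equal_build_symbol_index := by
  intro bw _ _
  unfold Spec_build_symbol_index build_symbol_index build_symbol_index_alt
  simp only
  set L := (PySem.Dict.ofList bw).values.flatten with hL
  obtain ⟨hI, hnd, hne⟩ := pv_inv L
  rw [← List.foldl_flatten, ← List.foldl_flatten, ← hL, hI,
      pv_assemble (L.foldl pv_stepG PySem.Dict.empty).items hnd hne]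
  rfl
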